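-- pv_equiv track=rewrite | github.com/Himanshu372/Practice | prac.py | longest_special_subseq
-- ===== SOURCE A (Python) =====
-- def longest_special_subseq(n,k,s):
--     longest_len = 0
--     #Code here
--     a = [ord(i) for i in s]
--     max_len = 0
--     for i in range(1, len(a)):
--         current_len = 0
--         for j in range(i):
--             if abs(a[j] - a[i]) <= k:
--                 current_len += 1
--         if current_len > max_len:
--             max_len = current_len
--     return max_len
-- ===== SOURCE B (Python) =====
-- def longest_special_subseq(n, k, s):
--     # One left-to-right pass keeping a counter of character codes seen so far:
--     # the count for position i is the sum of counts of codes within k of s[i].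
--     cnt = {}
--     best = 0
--     for i, ch in enumerate(s):
--         c = ord(ch)
--         if i > 0:
--             cur = sum(v for d, v in cnt.items() if abs(d - c) <= k)
--             if cur > best:
--                 best = cur
--         cnt[c] = cnt.get(c, 0) + 1
--     return best
-- ===== Notes on version B (the rewrite author's own statement) =====
-- stated objective: faster
-- what changed: Replaces A's O(n^2) nested rescan of all earlier positions with a single left-to-right pass that maintains a dict counting character codes seen so far and sums the counts of codes within k at each position.
import Mathlib
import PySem

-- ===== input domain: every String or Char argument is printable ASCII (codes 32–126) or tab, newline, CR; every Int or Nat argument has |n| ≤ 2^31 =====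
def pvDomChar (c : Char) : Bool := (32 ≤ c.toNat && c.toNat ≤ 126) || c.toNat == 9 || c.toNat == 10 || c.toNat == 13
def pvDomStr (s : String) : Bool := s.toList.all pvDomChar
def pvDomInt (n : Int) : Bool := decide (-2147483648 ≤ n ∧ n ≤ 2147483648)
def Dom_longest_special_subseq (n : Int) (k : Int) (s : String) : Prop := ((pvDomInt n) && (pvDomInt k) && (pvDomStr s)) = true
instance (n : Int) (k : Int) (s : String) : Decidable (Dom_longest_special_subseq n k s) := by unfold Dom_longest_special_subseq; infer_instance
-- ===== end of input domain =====

-- B replaces A's O(n^2) nested scan with one pass over the string keeping a counter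
-- (dict) of character codes seen so far, summing the counts of codes within k at each
-- position (objective: faster on long strings over a bounded alphabet).

-- ===== PORT A =====
-- inner loop: 'for j in range(i): if abs(a[j] - a[i]) <= k: current_len += 1'
def pvInnerA (a : List Int) (k : Int) (i : Int) : Int :=
  (PySem.List.pyRange 0 i 1).foldl
    (fun current_len j =>
      if |PySem.List.pyGetD a j 0 - PySem.List.pyGetD a i 0| ≤ k then current_len + 1
      else current_len) 0

-- outer loop: 'for i in range(1, len(a)): … if current_len > max_len: max_len = current_len'
def pvOuterA (a : List Int) (k : Int) : Int :=
  (PySem.List.pyRange 1 (a.length : Int) 1).foldl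
    (fun max_len i =>
      let current_len := pvInnerA a k i
      if current_len > max_len then current_len else max_len) 0

def longest_special_subseq (n : Int) (k : Int) (s : String) : Int :=
  -- longest_len = 0 is dead code in A
  let a : List Int := s.toList.map (fun c => (c.toNat : Int))
  pvOuterA a k

-- ===== PORT B =====
-- one step of B's loop body: query the counter (for i > 0), then count this char
def pvStepB (k : Int) (st : PySem.Dict Int Int × Int) (p : Int × Int) :
    PySem.Dict Int Int × Int :=
  let cnt := st.1
  let best := st.2
  let c := p.2
  let best' :=
    if p.1 > 0 then
      let cur := ((cnt.items.filter (fun q => decide (|q.1 - c| ≤ k))).map (·.2)).sum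
      if cur > best then cur else best
    else best
  (cnt.insert c (cnt.getD c 0 + 1), best')

def pvLoopB (k : Int) (a : List Int) : PySem.Dict Int Int × Int :=
  (PySem.List.enumerate a 0).foldl (pvStepB k) (PySem.Dict.empty, 0)

def longest_special_subseq_alt (n : Int) (k : Int) (s : String) : Int :=
  (pvLoopB k (s.toList.map (fun c => (c.toNat : Int)))).2

-- ===== PRECONDITION & SPEC =====
def Spec_longest_special_subseq (n : Int) (k : Int) (s : String) (out : Int) : Prop := out = longest_special_subseq_alt n k s
instance (n : Int) (k : Int) (s : String) (out : Int) : Decidable (Spec_longest_special_subseq n k s out) := by unfold Spec_longest_special_subseq; infer_instance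

-- ===== CLAIM (what is proved, stated in full; the proofs are below) =====
def Claim_equal_longest_special_subseq : Prop := ∀ (n : Int) (k : Int) (s : String), Dom_longest_special_subseq n k s → Spec_longest_special_subseq n k s (longest_special_subseq n k s)

-- ===== LEMMAS AND PROOFS =====

-- sum of the indicator 'd = x' over a duplicate-free list
theorem pv_sum_indicator (D : List Int) (x : Int) (hD : D.Nodup) :
    (D.map (fun d => if d = x then (1 : Int) else 0)).sum = if x ∈ D then 1 else 0 := by
  induction D with
  | nil => simp
  | cons y D ih =>
    rcases List.nodup_cons.mp hD with ⟨hy, hD'⟩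
    by_cases hxy : y = x
    · subst hxy
      simp [ih hD', hy]
    · have hxy' : ¬x = y := Ne.symm hxy
      simp only [List.map_cons, List.sum_cons, if_neg hxy, ih hD', List.mem_cons]
      by_cases hx : x ∈ D <;> simp [hx, hxy']

-- summing multiplicities over a duplicate-free code list that covers t is countP on t
theorem pv_sum_counts (t : List Int) (D : List Int) (p : Int → Bool)
    (hD : D.Nodup) (hcov : ∀ y ∈ t, p y = true → y ∈ D) :
    ((D.filter p).map (fun d => (t.count d : Int))).sum = (t.countP p : Int) := by
  induction t with
  | nil => simp
  | cons y t ih =>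
    have hcov' : ∀ z ∈ t, p z = true → z ∈ D := fun z hz => hcov z (by simp [hz])
    have hstep : ((D.filter p).map (fun d => ((y :: t).count d : Int))).sum
        = ((D.filter p).map (fun d => (t.count d : Int))).sum
          + ((D.filter p).map (fun d => if d = y then (1 : Int) else 0)).sum := by
      rw [← PySem.List.sum_map_add_int]
      refine congrArg List.sum (List.map_congr_left ?_)
      intro d _
      rw [List.count_cons]
      by_cases h : d = y
      · simp [h]
      · simp [h, Ne.symm h]
    have hind : ((D.filter p).map (fun d => if d = y then (1 : Int) else 0)).sum
        = if p y = true then (1 : Int) else 0 := by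
      rw [pv_sum_indicator _ _ (hD.filter p)]
      by_cases hp : p y = true
      · simp [hp, List.mem_filter, hcov y (by simp) hp]
      · simp [List.mem_filter, hp]
    rw [hstep, ih hcov', hind, List.countP_cons]
    by_cases hp : p y = true <;> simp [hp]

-- B's generator-sum over the counter of t is countP on t
theorem pv_counter_sum (t : List Int) (p : Int → Bool) :
    (((PySem.Dict.counter t).items.filter (fun q => p q.1)).map (·.2)).sum
      = (t.countP p : Int) := by
  rw [PySem.Dict.items_counter]
  simp only [List.filter_map, List.map_map, Function.comp_def]
  exact pv_sum_counts t _ p (PySem.Set.nodup_ofList t)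
    (fun y hy _ => (PySem.Set.mem_ofList _ _).mpr hy)

-- A's inner loop over the first i positions only reads the prefix
theorem pv_innerA_prefix (t : List Int) (x k i : Int) (h0 : 0 ≤ i)
    (hi : i < (t.length : Int)) :
    pvInnerA (t ++ [x]) k i = pvInnerA t k i := by
  unfold pvInnerA
  have hgi : PySem.List.pyGetD (t ++ [x]) i 0 = PySem.List.pyGetD t i 0 := by
    rw [PySem.List.pyGetD_eq_getElem _ _ h0 (by simp; omega),
        PySem.List.pyGetD_eq_getElem _ _ h0 (by omega)]
    exact List.getElem_append_left (by omega)
  rw [hgi]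
  refine PySem.List.foldl_congr_mem _ _ _ _ ?_
  intro acc j hj
  rcases (PySem.List.mem_pyRange_one).mp hj with ⟨hj0, hji⟩
  have hjl : j < (t.length : Int) := lt_of_lt_of_le hji (le_of_lt hi)
  rw [PySem.List.pyGetD_eq_getElem _ _ hj0 (by simp; omega),
      PySem.List.pyGetD_eq_getElem _ _ hj0 (by omega),
      List.getElem_append_left (by omega)]

-- A's inner loop at the appended position is a countP on the prefix
theorem pv_innerA_last (t : List Int) (x k : Int) :
    pvInnerA (t ++ [x]) k (t.length : Int)
      = (t.countP (fun y => decide (|y - x| ≤ k)) : Int) := by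
  unfold pvInnerA
  have hgx : PySem.List.pyGetD (t ++ [x]) (t.length : Int) 0 = x := by
    rw [PySem.List.pyGetD_eq_getElem _ _ (by omega) (by simp)]
    simp
  rw [hgx]
  have hcong : (PySem.List.pyRange 0 (t.length : Int) 1).foldl
      (fun (current_len : Int) j =>
        if |PySem.List.pyGetD (t ++ [x]) j 0 - x| ≤ k then current_len + 1 else current_len) (0 : Int)
      = (PySem.List.pyRange 0 (t.length : Int) 1).foldl
      (fun (current_len : Int) j =>
        if |PySem.List.pyGetD t j 0 - x| ≤ k then current_len + 1 else current_len) (0 : Int) := by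
    refine PySem.List.foldl_congr_mem _ _ _ _ ?_
    intro acc j hj
    rcases (PySem.List.mem_pyRange_one).mp hj with ⟨hj0, hji⟩
    rw [PySem.List.pyGetD_eq_getElem _ _ hj0 (by simp; omega),
        PySem.List.pyGetD_eq_getElem _ _ hj0 (by omega),
        List.getElem_append_left (by omega)]
  refine hcong.trans ?_
  rw [PySem.List.foldl_pyRange_zero_pyGetD' t 0
        (f := fun current_len y => if |y - x| ≤ k then current_len + 1 else current_len) 0,
      PySem.List.foldl_ite_add_one]
  simp

-- A returns 0 on the empty string
theorem pv_outerA_nil (k : Int) : pvOuterA [] k = 0 := by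
  unfold pvOuterA
  rw [PySem.List.pyRange_one_eq_nil (by simp)]
  rfl

-- A's outer loop, unrolled one appended character at a time
theorem pv_outerA_append (t : List Int) (x k : Int) :
    pvOuterA (t ++ [x]) k
      = if t = [] then 0
        else
          let cur := (t.countP (fun y => decide (|y - x| ≤ k)) : Int)
          if cur > pvOuterA t k then cur else pvOuterA t k := by
  by_cases ht : t = []
  · subst ht
    unfold pvOuterA
    rw [List.nil_append, PySem.List.pyRange_one_eq_nil (by simp)]
    simp
  · have hlen : 0 < t.length := List.length_pos_iff.mpr ht
    unfold pvOuterA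
    have h1 : (((t ++ [x]).length : Int)) = (t.length : Int) + 1 := by simp
    rw [h1, PySem.List.pyRange_one_succ_right (by omega), List.foldl_append]
    have hpre : (PySem.List.pyRange 1 (t.length : Int) 1).foldl
        (fun max_len i =>
          let current_len := pvInnerA (t ++ [x]) k i
          if current_len > max_len then current_len else max_len) 0
        = (PySem.List.pyRange 1 (t.length : Int) 1).foldl
        (fun max_len i =>
          let current_len := pvInnerA t k i
          if current_len > max_len then current_len else max_len) 0 := by
      refine PySem.List.foldl_congr_mem _ _ _ _ ?_
      intro acc i hi
      rcases (PySem.List.mem_pyRange_one).mp hi with ⟨hi1, hil⟩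
      simp only [pv_innerA_prefix t x k i (by omega) hil]
    rw [hpre]
    simp only [List.foldl_cons, List.foldl_nil, pv_innerA_last t x k, if_neg ht]

-- the insert-based counting step builds exactly the counter of the extended prefix
theorem pv_counter_step (t : List Int) (x : Int) :
    (PySem.Dict.counter t).insert x ((PySem.Dict.counter t).getD x 0 + 1)
      = PySem.Dict.counter (t ++ [x]) := by
  rw [← PySem.Dict.foldl_insert_getD_add_one_eq_counter t,
      ← PySem.Dict.foldl_insert_getD_add_one_eq_counter (t ++ [x]),
      List.foldl_append]
  rfl

-- loop invariant: after the prefix t, B's state is (counter t, A's answer on t)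
theorem pv_loopB_eq (k : Int) (a : List Int) :
    pvLoopB k a = (PySem.Dict.counter a, pvOuterA a k) := by
  induction a using List.reverseRecOn with
  | nil =>
    simp [pvLoopB, pv_outerA_nil]
    rfl
  | append_singleton t x ih =>
    unfold pvLoopB at ih ⊢
    rw [PySem.List.enumerate_append, List.foldl_append, ih]
    simp only [PySem.List.enumerate_cons, PySem.List.enumerate_nil, List.foldl_cons,
      List.foldl_nil, zero_add]
    simp only [pvStepB]
    rw [pv_outerA_append t x k, pv_counter_step t x]
    by_cases ht : t = []
    · subst ht; simp [pv_outerA_nil]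
    · have hlen : 0 < t.length := List.length_pos_iff.mpr ht
      have hpos : ((t.length : Int) > 0) := by exact_mod_cast hlen
      simp only [hpos, if_pos, if_neg ht,
        pv_counter_sum t (fun y => decide (|y - x| ≤ k))]

-- ===== VERDICT (by name: the statement is the Claim_ definition above) =====
theorem longest_special_subseq_spec : Claim_equal_longest_special_subseq := by
  intro n k s _
  unfold Spec_longest_special_subseq longest_special_subseq longest_special_subseq_alt
  rw [pv_loopB_eq]
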